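-- pv_equiv track=rewrite | github.com/jthunt12/CHORD | chord.py | designate_val
-- ===== SOURCE A (Python) =====
-- def designate_val(needToFind, k_table):
--     """
--     This function finds the optimal position and sends it to K
--     :param needToFind:
--     :param k_table:
--     :return head_pos:
--     """
--     initial_head = 0
--     head_pos = 0
--     numb_check = False
--     for i in range(0, len(k_table)):
--         if needToFind == k_table[i]:
--             return True
--         if needToFind > k_table[i] > initial_head:
--             initial_head = k_table[i]
--             head_pos = i
--             numb_check = True
--     if numb_check is False:
--         return len(k_table)-1
--     return head_pos
-- ===== SOURCE B (Python) =====
-- def designate_val(needToFind, k_table):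
--     if needToFind in k_table:
--         return True
--     cands = [v for v in k_table if 0 < v < needToFind]
--     if not cands:
--         return len(k_table) - 1
--     return k_table.index(max(cands))
-- ===== Notes on version B (the rewrite author's own statement) =====
-- stated objective: simpler
-- what changed: A's fused stateful scan (running best, its index, and a found-flag updated in one loop) is decomposed into a membership test, a filter of the candidates 0 < v < needToFind, max over them, and list.index for the first occurrence.
-- outside the precondition, e.g. on designate_val(2, [9, 1, 89, -1, 2]): A returns True, B returns True
import Mathlib
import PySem

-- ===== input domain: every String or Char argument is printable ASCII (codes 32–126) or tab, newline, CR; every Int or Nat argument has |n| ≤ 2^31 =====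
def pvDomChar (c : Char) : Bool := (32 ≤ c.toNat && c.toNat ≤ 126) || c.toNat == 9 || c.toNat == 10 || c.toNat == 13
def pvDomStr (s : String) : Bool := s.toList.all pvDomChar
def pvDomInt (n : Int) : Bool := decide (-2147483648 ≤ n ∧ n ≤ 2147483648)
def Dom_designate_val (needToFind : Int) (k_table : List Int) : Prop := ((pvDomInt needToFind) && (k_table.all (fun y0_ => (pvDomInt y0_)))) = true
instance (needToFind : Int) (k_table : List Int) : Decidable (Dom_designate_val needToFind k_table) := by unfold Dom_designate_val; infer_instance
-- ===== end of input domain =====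

-- B replaces A's fused stateful scan by a membership test plus a filter/max/first-index
-- decomposition (objective: simpler); same return values, including Python True ported as 1.

-- ===== PORT A =====
-- literal transliteration of A's for-loop over the indexed table with state
-- (initial_head, head_pos, numb_check); Python's `return True` is the Int 1 (True == 1).
def pvAloop (n : Int) (len1 : Int) : List (Int × Int) → Int → Int → Bool → Int
  | [], _, hp, nc => if nc = false then len1 else hp
  | (i, v) :: rest, ih, hp, nc =>
    if n = v then 1
    else if n > v ∧ v > ih then pvAloop n len1 rest v i true
    else pvAloop n len1 rest ih hp nc

def designate_val (needToFind : Int) (k_table : List Int) : Int :=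
  pvAloop needToFind ((k_table.length : Int) - 1) (PySem.List.enumerate k_table 0) 0 0 false

-- ===== PORT B =====
def designate_val_alt (needToFind : Int) (k_table : List Int) : Int :=
  if k_table.contains needToFind then 1
  else
    let cands := k_table.filter (fun v => decide (0 < v) && decide (v < needToFind))
    match PySem.List.max? cands (fun v => v) with
    | none => (k_table.length : Int) - 1
    | some best =>
      match PySem.List.index? k_table best with
      | some i => (i : Int)
      | none => 0  -- unreachable: best ∈ k_table (Python's .index never raises here)

-- ===== PRECONDITION & SPEC =====
-- Pre_ excludes inputs where needToFind occurs in k_table: there Python A returns the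
-- bool True, not an int, so that case lies outside the declared return type (B does the same).
def Pre_designate_val (needToFind : Int) (k_table : List Int) : Prop := needToFind ∉ k_table
instance (needToFind : Int) (k_table : List Int) : Decidable (Pre_designate_val needToFind k_table) := by unfold Pre_designate_val; infer_instance
def pvWitness_designate_val : Int × List Int := (4, [5, 1, 3])
def Spec_designate_val (needToFind : Int) (k_table : List Int) (out : Int) : Prop := out = designate_val_alt needToFind k_table
instance (needToFind : Int) (k_table : List Int) (out : Int) : Decidable (Spec_designate_val needToFind k_table out) := by unfold Spec_designate_val; infer_instance

-- ===== CLAIM (what is proved, stated in full; the proofs are below) =====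
def Claim_equal_designate_val : Prop := ∀ (needToFind : Int) (k_table : List Int), Dom_designate_val needToFind k_table → Pre_designate_val needToFind k_table → Spec_designate_val needToFind k_table (designate_val needToFind k_table)

-- ===== LEMMAS AND PROOFS =====

-- running max facts
lemma foldl_max_out (l : List Int) : ∀ a b : Int, l.foldl max (max a b) = max (l.foldl max a) b := by
  induction l with
  | nil => intro a b; rfl
  | cons x t ih =>
    intro a b
    simp only [List.foldl_cons]
    rw [show max (max a b) x = max (max a x) b by omega, ih]

lemma le_foldl_max (l : List Int) : ∀ a : Int, a ≤ l.foldl max a := by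
  induction l with
  | nil => intro a; simp
  | cons x t ih =>
    intro a
    exact le_trans (le_max_left a x) (ih (max a x))

lemma foldl_max_mem (cs : List Int) : ∀ c : Int, cs.foldl max c ∈ c :: cs := by
  induction cs with
  | nil => intro c; simp
  | cons x t ih =>
    intro c
    simp only [List.foldl_cons]
    have h := ih (max c x)
    simp only [List.mem_cons] at h ⊢
    rcases h with h | h
    · rcases max_choice c x with h' | h' <;> rw [h'] at h ⊢
      · exact Or.inl h
      · exact Or.inr (Or.inl h)
    · exact Or.inr (Or.inr h)

lemma foldl_max_filter_shift (n : Int) (l : List Int) : ∀ (ih v : Int), ih ≤ v →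
    (l.filter (fun w => decide (ih < w) && decide (w < n))).foldl max v
      = (l.filter (fun w => decide (v < w) && decide (w < n))).foldl max v := by
  induction l with
  | nil => intro ih v _; rfl
  | cons x t IH =>
    intro ih v hle
    by_cases hxn : x < n
    · by_cases hihx : ih < x
      · have e1 : (x :: t).filter (fun w => decide (ih < w) && decide (w < n))
            = x :: t.filter (fun w => decide (ih < w) && decide (w < n)) := by
          simp [hihx, hxn]
        by_cases hvx : v < x
        · have e2 : (x :: t).filter (fun w => decide (v < w) && decide (w < n))
              = x :: t.filter (fun w => decide (v < w) && decide (w < n)) := by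
            simp [hvx, hxn]
          rw [e1, e2, List.foldl_cons, List.foldl_cons, foldl_max_out, foldl_max_out,
            IH ih v hle]
        · have e2 : (x :: t).filter (fun w => decide (v < w) && decide (w < n))
              = t.filter (fun w => decide (v < w) && decide (w < n)) := by
            simp [hvx]
          rw [e1, e2, List.foldl_cons, foldl_max_out, IH ih v hle]
          exact max_eq_left (le_trans (le_of_not_gt hvx) (le_foldl_max _ v))
      · have hvx : ¬ v < x := fun h => hihx (lt_of_le_of_lt hle h)
        have e1 : (x :: t).filter (fun w => decide (ih < w) && decide (w < n))
            = t.filter (fun w => decide (ih < w) && decide (w < n)) := by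
          simp [hihx]
        have e2 : (x :: t).filter (fun w => decide (v < w) && decide (w < n))
            = t.filter (fun w => decide (v < w) && decide (w < n)) := by
          simp [hvx]
        rw [e1, e2]; exact IH ih v hle
    · have e1 : (x :: t).filter (fun w => decide (ih < w) && decide (w < n))
          = t.filter (fun w => decide (ih < w) && decide (w < n)) := by
        simp [hxn]
      have e2 : (x :: t).filter (fun w => decide (v < w) && decide (w < n))
          = t.filter (fun w => decide (v < w) && decide (w < n)) := by
        simp [hxn]
      rw [e1, e2]; exact IH ih v hle

-- shape of B's max over a candidate list, used to state the loop characterisation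
def pvBest (l : List Int) : Option Int :=
  match l with
  | [] => none
  | c :: cs => some (cs.foldl max c)

-- main characterisation of A's loop when n is not in the table
lemma pvAloop_no_match (n len1 : Int) : ∀ (kt : List Int) (k ih hp : Int) (nc : Bool),
    0 ≤ ih → n ∉ kt →
    pvAloop n len1 (PySem.List.enumerate kt k) ih hp nc =
      (pvBest (kt.filter (fun w => decide (ih < w) && decide (w < n)))).elim
        (if nc = false then len1 else hp) (fun M => k + ((kt.idxOf M : Nat) : Int)) := by
  intro kt
  induction kt with
  | nil => intro k ih hp nc _ _; rfl
  | cons v rest IH =>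
    intro k ih hp nc hih hnm
    have hv : n ≠ v := fun h => hnm (h ▸ List.mem_cons_self)
    have hr : n ∉ rest := fun h => hnm (List.mem_cons_of_mem v h)
    rw [PySem.List.enumerate_cons]
    have unf : pvAloop n len1 ((k, v) :: PySem.List.enumerate rest (k + 1)) ih hp nc
        = if n = v then 1
          else if n > v ∧ v > ih then pvAloop n len1 (PySem.List.enumerate rest (k+1)) v k true
          else pvAloop n len1 (PySem.List.enumerate rest (k+1)) ih hp nc := rfl
    by_cases hc : n > v ∧ v > ih
    · have hiv : ih < v := hc.2
      have hvn : v < n := hc.1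
      rw [unf, if_neg hv, if_pos hc]
      rw [IH (k+1) v k true (le_of_lt (lt_of_le_of_lt hih hiv)) hr]
      have e1 : (v :: rest).filter (fun w => decide (ih < w) && decide (w < n))
          = v :: rest.filter (fun w => decide (ih < w) && decide (w < n)) := by
        simp [hiv, hvn]
      rw [e1]
      have hshift := foldl_max_filter_shift n rest ih v (le_of_lt hiv)
      rcases h0 : rest.filter (fun w => decide (v < w) && decide (w < n)) with _ | ⟨c, cs⟩
      · have hM : (rest.filter (fun w => decide (ih < w) && decide (w < n))).foldl max v = v := by
          rw [hshift, h0]; rfl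
        simp only [pvBest, Option.elim_none, Option.elim_some, hM, List.idxOf_cons_self]
        norm_num
      · have hcmem : c ∈ rest.filter (fun w => decide (v < w) && decide (w < n)) := by
          rw [h0]; exact List.mem_cons_self
        have hvc : v < c := by
          have := List.of_mem_filter hcmem
          simp only [Bool.and_eq_true, decide_eq_true_eq] at this
          exact this.1
        have hM : (rest.filter (fun w => decide (ih < w) && decide (w < n))).foldl max v
            = cs.foldl max c := by
          rw [hshift, h0, List.foldl_cons, max_eq_right (le_of_lt hvc)]
        have hMmem : cs.foldl max c ∈ c :: cs := foldl_max_mem cs c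
        have hMfilt : cs.foldl max c ∈ rest.filter (fun w => decide (v < w) && decide (w < n)) := by
          rw [h0]; exact hMmem
        have hvM : v < cs.foldl max c := by
          have := List.of_mem_filter hMfilt
          simp only [Bool.and_eq_true, decide_eq_true_eq] at this
          exact this.1
        have hne : v ≠ cs.foldl max c := ne_of_lt hvM
        simp only [pvBest, Option.elim_some, hM, List.idxOf_cons_ne _ hne]
        push_cast
        ring
    · rw [unf, if_neg hv, if_neg hc]
      rw [IH (k+1) ih hp nc hih hr]
      have hpred : ¬ (ih < v ∧ v < n) := fun h => hc ⟨h.2, h.1⟩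
      have e1 : (v :: rest).filter (fun w => decide (ih < w) && decide (w < n))
          = rest.filter (fun w => decide (ih < w) && decide (w < n)) := by
        by_cases h1 : ih < v
        · have h2 : ¬ v < n := fun h => hpred ⟨h1, h⟩
          simp [h2]
        · simp [h1]
      rw [e1]
      rcases h0 : rest.filter (fun w => decide (ih < w) && decide (w < n)) with _ | ⟨c, cs⟩
      · rfl
      · have hMmem : cs.foldl max c ∈ c :: cs := foldl_max_mem cs c
        have hMfilt : cs.foldl max c ∈ rest.filter (fun w => decide (ih < w) && decide (w < n)) := by
          rw [h0]; exact hMmem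
        have hMp := List.of_mem_filter hMfilt
        simp only [Bool.and_eq_true, decide_eq_true_eq] at hMp
        have hne : v ≠ cs.foldl max c := fun h => hpred ⟨h ▸ hMp.1, h ▸ hMp.2⟩
        simp only [pvBest, Option.elim_some, List.idxOf_cons_ne _ hne]
        push_cast
        ring

-- bridge: Python's list.index on a present element is idxOf
lemma index?_of_mem (kt : List Int) (v : Int) : ∀ _ : v ∈ kt,
    PySem.List.index? kt v = some (kt.idxOf v) := by
  induction kt with
  | nil => intro h; cases h
  | cons x t ih =>
    intro h
    by_cases hx : x = v
    · subst hx
      rw [PySem.List.index?_cons_self, List.idxOf_cons_self]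
    · have ht : v ∈ t := by
        cases h with
        | head => exact absurd rfl hx
        | tail _ h => exact h
      rw [PySem.List.index?_cons_of_ne t hx, ih ht, List.idxOf_cons_ne _ hx]
      rfl

-- ===== VERDICT (by name: the statement is the Claim_ definition above) =====
theorem designate_val_spec : Claim_equal_designate_val := by
  intro n kt _ hm
  unfold Pre_designate_val at hm
  unfold Spec_designate_val designate_val designate_val_alt
  have hcon : kt.contains n = false := by simp [hm]
  rw [pvAloop_no_match n ((kt.length : Int) - 1) kt 0 0 0 false le_rfl hm, hcon]
  simp only [Bool.false_eq_true, if_false]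
  rcases h0 : kt.filter (fun w => decide (0 < w) && decide (w < n)) with _ | ⟨c, cs⟩
  · simp [pvBest, PySem.List.max?]
  · rw [PySem.List.max?_id_cons]
    have hM : cs.foldl max c ∈ kt := by
      have h1 : cs.foldl max c ∈ c :: cs := foldl_max_mem cs c
      have h2 : cs.foldl max c ∈ kt.filter (fun w => decide (0 < w) && decide (w < n)) := by
        rw [h0]; exact h1
      exact List.mem_of_mem_filter h2
    have h3 := index?_of_mem kt _ hM
    rw [PySem.List.index?_eq_idxOf?] at h3
    simp [pvBest, h3]
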